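-- pv_equiv track=rewrite | github.com/Custom-Pipeline-Defect-Detector/pipeline-defect-detection- | pipeline_full_integration.py | group_by_code
-- ===== SOURCE A (Python) =====
-- from typing import List, Dict, Any, Tuple
--
-- def group_by_code(dets: List[Dict[str, Any]]) -> Dict[str, List[Dict[str, Any]]]:
--     buckets = {}
--     for d in dets:
--         code = d["code"]
--         if code == "UNK":
--             # ignore unknown classes
--             continue
--         buckets.setdefault(code, []).append(d)
--     return buckets
-- ===== SOURCE B (Python) =====
-- from typing import List, Dict, Any
--
-- def group_by_code(dets: List[Dict[str, Any]]) -> Dict[str, List[Dict[str, Any]]]: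
--     # worklist partition: repeatedly take the first remaining detection's code,
--     # extract its whole bucket from the remaining list, and continue on the rest
--     out = {}
--     remaining = dets
--     while remaining:
--         d, rest = remaining[0], remaining[1:]
--         c = d["code"]
--         if c == "UNK":
--             remaining = rest
--             continue
--         out[c] = [d] + [x for x in rest if x["code"] == c]
--         remaining = [x for x in rest if x["code"] != c]
--     return out
-- ===== Notes on version B (the rewrite author's own statement) =====
-- stated objective: alternative
-- what changed: Replaces the single-pass hash bucketing with setdefault by a worklist partition loop: repeatedly take the first remaining detection's code, extract that code's entire bucket from the remaining list with two filters, and continue on what is left.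
import Mathlib
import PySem

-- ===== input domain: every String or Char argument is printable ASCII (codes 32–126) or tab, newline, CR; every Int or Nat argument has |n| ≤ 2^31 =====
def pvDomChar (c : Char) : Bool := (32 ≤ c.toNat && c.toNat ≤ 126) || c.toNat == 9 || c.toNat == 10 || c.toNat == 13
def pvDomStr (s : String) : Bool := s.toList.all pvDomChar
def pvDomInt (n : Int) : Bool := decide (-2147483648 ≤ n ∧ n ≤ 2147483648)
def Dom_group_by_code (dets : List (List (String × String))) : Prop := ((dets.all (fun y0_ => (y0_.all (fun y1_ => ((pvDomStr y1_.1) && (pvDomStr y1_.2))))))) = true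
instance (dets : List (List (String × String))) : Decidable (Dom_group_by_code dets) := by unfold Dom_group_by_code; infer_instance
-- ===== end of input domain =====

-- B replaces A's single-pass setdefault bucketing by a worklist partition loop: repeatedly
-- extract the whole bucket of the first remaining detection's code; alternative, not faster.


-- d["code"]: first-match lookup; the "" in the missing-key case stands for Python's KeyError,
-- which Pre_group_by_code excludes
def codeOf (d : List (String × String)) : String :=
  match d.find? (fun p => p.1 == "code") with
  | some p => p.2
  | none => ""

-- ===== PORT A =====
-- buckets.setdefault(code, []).append(d) == buckets[code] = buckets.get(code, []) + [d] == Dict.modify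
def group_by_code (dets : List (List (String × String))) : List (String × List (List (String × String))) :=
  (dets.foldl
    (fun buckets d =>
      let code := codeOf d
      if code == "UNK" then buckets
      else buckets.modify code [] (fun l => l ++ [d]))
    PySem.Dict.empty).items

-- ===== PORT B =====
-- the while loop of Source B: state (remaining, out); each iteration consumes the head and,
-- for a non-UNK code, extracts that code's entire bucket from the remaining worklist
def altLoop (remaining : List (List (String × String)))
    (out : PySem.Dict String (List (List (String × String)))) :
    PySem.Dict String (List (List (String × String))) :=
  match remaining with
  | [] => out
  | d :: rest =>
    let c := codeOf d
    if c == "UNK" then altLoop rest out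
    else
      altLoop (rest.filter (fun x => !(codeOf x == c)))
        (out.insert c (d :: rest.filter (fun x => codeOf x == c)))
termination_by remaining.length
decreasing_by
  · simp
  · simp only [List.length_cons, List.length_unattach]
    exact Nat.lt_succ_of_le (le_trans (List.length_filter_le _ _) (by simp))

def group_by_code_alt (dets : List (List (String × String))) : List (String × List (List (String × String))) :=
  (altLoop dets PySem.Dict.empty).items

-- ===== PRECONDITION & SPEC =====
-- Pre_ excludes exactly the inputs where some detection lacks the "code" key (Python raises KeyError)
def Pre_group_by_code (dets : List (List (String × String))) : Prop :=
  ∀ d ∈ dets, "code" ∈ d.map Prod.fst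
instance (dets : List (List (String × String))) : Decidable (Pre_group_by_code dets) := by unfold Pre_group_by_code; infer_instance

def pvWitness_group_by_code : (List (List (String × String))) :=
  [[("code", "A"), ("x", "1")], [("code", "UNK")], [("code", "B")], [("code", "A")]]

def Spec_group_by_code (dets : List (List (String × String))) (out : List (String × List (List (String × String)))) : Prop := out = group_by_code_alt dets
instance (dets : List (List (String × String))) (out : List (String × List (List (String × String)))) : Decidable (Spec_group_by_code dets out) := by unfold Spec_group_by_code; infer_instance

-- ===== CLAIM (what is proved, stated in full; the proofs are below) =====
def Claim_equal_group_by_code : Prop := ∀ (dets : List (List (String × String))), Dom_group_by_code dets → Pre_group_by_code dets → Spec_group_by_code dets (group_by_code dets)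

-- ===== LEMMAS AND PROOFS =====

-- the common canonical form both ports are proved equal to: the distinct non-UNK codes in
-- first-occurrence order, each paired with its filter over the whole input
def canonicalList (l : List (List (String × String))) : List (String × List (List (String × String))) :=
  (PySem.Set.ofList ((l.filter (fun d => !(codeOf d == "UNK"))).map codeOf)).map
    (fun c => (c, l.filter (fun d => codeOf d == c)))

-- unfolding equations for the WF-recursive loop
theorem altLoop_nil (out : PySem.Dict String (List (List (String × String)))) :
    altLoop [] out = out := by rw [altLoop.eq_def]

theorem altLoop_cons (d : List (String × String)) (rest : List (List (String × String)))
    (out : PySem.Dict String (List (List (String × String)))) :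
    altLoop (d :: rest) out =
      if codeOf d == "UNK" then altLoop rest out
      else altLoop (rest.filter (fun x => !(codeOf x == codeOf d)))
        (out.insert (codeOf d) (d :: rest.filter (fun x => codeOf x == codeOf d))) := by
  rw [altLoop.eq_def]

-- skipping the "UNK" elements inside a fold = folding over the filtered list
theorem foldl_skip {α β : Type} (g : β → α → β) (p : α → Bool) :
    ∀ (l : List α) (b : β),
      l.foldl (fun b d => if p d then b else g b d) b = (l.filter (fun d => !p d)).foldl g b := by
  intro l
  induction l with
  | nil => intro b; rfl
  | cons x xs ih =>
    intro b
    by_cases h : p x = true <;> simp [h, ih]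

-- every code appearing in the canonical code set is non-UNK
theorem mem_codes_ne_UNK (l : List (List (String × String))) (c : String)
    (hc : c ∈ PySem.Set.ofList ((l.filter (fun d => !(codeOf d == "UNK"))).map codeOf)) :
    c ≠ "UNK" := by
  rw [PySem.Set.mem_ofList] at hc
  obtain ⟨d, hd, hcd⟩ := List.mem_map.mp hc
  rw [List.mem_filter] at hd
  intro h; rw [h] at hcd; rw [hcd] at hd; simp at hd

-- A's bucket dict, read out as items, is the canonical form
theorem A_eq_canonical (dets : List (List (String × String))) :
    group_by_code dets = canonicalList dets := by
  unfold group_by_code canonicalList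
  show (dets.foldl (fun buckets d => if codeOf d == "UNK" then buckets
        else buckets.modify (codeOf d) [] (fun l => l ++ [d])) PySem.Dict.empty).items
      = (PySem.Set.ofList ((dets.filter (fun d => !(codeOf d == "UNK"))).map codeOf)).map
          (fun c => (c, dets.filter (fun d => codeOf d == c)))
  rw [foldl_skip]
  set lf := dets.filter (fun d => !(codeOf d == "UNK")) with hlf
  have hnd : (lf.foldl (fun b d => b.modify (codeOf d) [] (fun l => l ++ [d])) PySem.Dict.empty).keys.Nodup :=
    PySem.Dict.nodup_keys_foldl_modify_key lf codeOf [] (fun _ d l => l ++ [d]) PySem.Dict.empty (by simp)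
  rw [PySem.Dict.items_eq_map_keys _ hnd []]
  rw [PySem.Dict.keys_foldl_modify_key lf codeOf [] (fun _ d l => l ++ [d]) PySem.Dict.empty]
  rw [show PySem.Dict.empty.keys = ([] : List String) from rfl, PySem.Set.update_nil_left]
  apply List.map_congr_left
  intro c hc
  have hgd : (lf.foldl (fun b d => b.modify (codeOf d) [] (fun l => l ++ [d])) PySem.Dict.empty).getD c []
      = lf.filter (fun d => codeOf d == c) := by
    rw [show (lf.foldl (fun b d => b.modify (codeOf d) [] (fun l => l ++ [d])) PySem.Dict.empty)
        = ((lf.map (fun d => (codeOf d, d))).foldl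
            (fun b p => b.modify p.1 [] (fun l => l ++ [p.2]))
            PySem.Dict.empty) from (List.foldl_map (f := fun d => (codeOf d, d))
            (g := fun b p => b.modify p.1 [] (fun l => l ++ [p.2])) (l := lf)
            (init := PySem.Dict.empty)).symm]
    rw [PySem.Dict.getD_foldl_modify_append]
    simp [List.filter_map, List.map_map, Function.comp_def]
  rw [hgd, hlf, List.filter_filter]
  congr 1
  apply List.filter_congr
  intro d _
  by_cases h : codeOf d == c
  · have : codeOf d = c := by simpa using h
    simp [this, mem_codes_ne_UNK dets c hc]
  · simp [h]

-- folding Set.add over a list is unchanged by dropping elements already in the accumulator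
theorem foldl_add_filter_of_mem {α : Type} [BEq α] [LawfulBEq α] (x : α) :
    ∀ (ys : List α) (s : PySem.Set α), x ∈ s →
      ys.foldl PySem.Set.add s = (ys.filter (fun y => !(y == x))).foldl PySem.Set.add s := by
  intro ys
  induction ys with
  | nil => intro s _; rfl
  | cons y t ih =>
    intro s hs
    by_cases h : y = x
    · subst h
      have hadd : PySem.Set.add s y = s := by
        simp [PySem.Set.add, PySem.Set.contains, hs]
      rw [List.foldl_cons, hadd, List.filter_cons_of_neg (by simp), ih s hs]
    · rw [List.filter_cons_of_pos (by simp [h]), List.foldl_cons, List.foldl_cons]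
      exact ih _ ((PySem.Set.mem_add _ _ _).mpr (Or.inl hs))

-- folding Set.add over elements distinct from a can be carried out below a pinned head a
theorem foldl_add_cons {α : Type} [BEq α] [LawfulBEq α] (a : α) :
    ∀ (ys : List α) (s : PySem.Set α), (∀ y ∈ ys, y ≠ a) →
      ys.foldl PySem.Set.add (a :: s) = a :: ys.foldl PySem.Set.add s := by
  intro ys
  induction ys with
  | nil => intro s _; rfl
  | cons y t ih =>
    intro s h
    have hya : y ≠ a := h y (by simp)
    have hadd : PySem.Set.add (a :: s) y = a :: PySem.Set.add s y := by
      by_cases hys : y ∈ s <;>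
        simp [PySem.Set.add, PySem.Set.contains, hys, hya]
    rw [List.foldl_cons, hadd, List.foldl_cons, ih _ (fun z hz => h z (by simp [hz]))]

-- set(x :: xs) = x followed by set(xs with x removed)
theorem ofList_cons_filter {α : Type} [BEq α] [LawfulBEq α] (x : α) (xs : List α) :
    PySem.Set.ofList (x :: xs) = x :: PySem.Set.ofList (xs.filter (fun y => !(y == x))) := by
  show (x :: xs).foldl PySem.Set.add [] = x :: (xs.filter (fun y => !(y == x))).foldl PySem.Set.add []
  rw [List.foldl_cons]
  have h1 : PySem.Set.add ([] : PySem.Set α) x = [x] := rfl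
  rw [h1, foldl_add_filter_of_mem x xs [x] (by simp)]
  exact foldl_add_cons x _ [] (by
    intro y hy
    rw [List.mem_filter] at hy
    simpa using hy.2)

-- canonical form: a leading UNK detection is invisible
theorem canonical_cons_UNK (d : List (String × String)) (rest : List (List (String × String)))
    (h : codeOf d = "UNK") : canonicalList (d :: rest) = canonicalList rest := by
  unfold canonicalList
  rw [List.filter_cons_of_neg (by simp [h])]
  apply List.map_congr_left
  intro c hc
  rw [List.filter_cons_of_neg (by simp [h, Ne.symm (mem_codes_ne_UNK rest c hc)])]

-- canonical form: a leading non-UNK detection contributes its whole bucket up front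
theorem canonical_cons (d : List (String × String)) (rest : List (List (String × String)))
    (h : ¬ codeOf d = "UNK") :
    canonicalList (d :: rest)
      = (codeOf d, d :: rest.filter (fun x => codeOf x == codeOf d))
        :: canonicalList (rest.filter (fun x => !(codeOf x == codeOf d))) := by
  unfold canonicalList
  rw [List.filter_cons_of_pos (by simp [h]), List.map_cons, ofList_cons_filter,
    List.map_cons, List.filter_cons_of_pos (by simp)]
  congr 1
  have hcodes : ((rest.filter (fun x => !(codeOf x == "UNK"))).map codeOf).filter
        (fun y => !(y == codeOf d))
      = ((rest.filter (fun x => !(codeOf x == codeOf d))).filter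
          (fun x => !(codeOf x == "UNK"))).map codeOf := by
    rw [List.filter_map, List.filter_filter, List.filter_filter]
    congr 1
    apply List.filter_congr
    intro x _
    simp [Bool.and_comm]
  rw [hcodes]
  apply List.map_congr_left
  intro c' hc'
  have hc'c : ¬ c' = codeOf d := by
    rw [PySem.Set.mem_ofList] at hc'
    obtain ⟨x, hx, hcx⟩ := List.mem_map.mp hc'
    rw [List.mem_filter, List.mem_filter] at hx
    have hxc := hx.1.2
    rw [hcx] at hxc
    simpa using hxc
  rw [List.filter_cons_of_neg (by simp; exact fun hh => hc'c hh.symm), List.filter_filter]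
  congr 1
  apply List.filter_congr
  intro x _
  by_cases hx : codeOf x == c'
  · have hxc : codeOf x = c' := by simpa using hx
    simp [hxc, hc'c]
  · simp [hx]

-- loop invariant of B's while loop: fresh codes append, so items = old items ++ canonical groups
theorem altLoop_items :
    ∀ (n : Nat) (remaining : List (List (String × String)))
      (out : PySem.Dict String (List (List (String × String)))),
      remaining.length ≤ n →
      (∀ x ∈ remaining, out.contains (codeOf x) = false) →
      (altLoop remaining out).items = out.items ++ canonicalList remaining := by
  intro n
  induction n with
  | zero =>
    intro remaining out hlen _
    rw [List.length_eq_zero_iff.mp (Nat.le_zero.mp hlen), altLoop_nil]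
    simp [canonicalList, PySem.Set.ofList]
  | succ n ih =>
    intro remaining out hlen h
    match remaining with
    | [] => rw [altLoop_nil]; simp [canonicalList, PySem.Set.ofList]
    | d :: rest =>
      rw [altLoop_cons]
      by_cases hUNK : codeOf d = "UNK"
      · rw [if_pos (by simp [hUNK])]
        rw [ih rest out (by simpa using hlen) (fun x hx => h x (by simp [hx])),
          canonical_cons_UNK d rest hUNK]
      · rw [if_neg (by simp [hUNK])]
        have hcontains : out.contains (codeOf d) = false := h d (by simp)
        rw [ih (rest.filter (fun x => !(codeOf x == codeOf d)))
            (out.insert (codeOf d) (d :: rest.filter (fun x => codeOf x == codeOf d)))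
            (le_trans (List.length_filter_le _ _) (by simpa using hlen))
            (by
              intro x hx
              rw [List.mem_filter] at hx
              rw [PySem.Dict.contains_insert]
              simp only [Bool.or_eq_false_iff]
              exact ⟨by simpa using hx.2, h x (by simp [hx.1])⟩)]
        rw [PySem.Dict.items_insert_of_not_contains (h := hcontains)]
        rw [canonical_cons d rest hUNK]
        simp

-- ===== VERDICT (by name: the statement is the Claim_ definition above) =====
theorem group_by_code_spec : Claim_equal_group_by_code := by
  intro dets _ _
  show group_by_code dets = group_by_code_alt dets
  rw [A_eq_canonical]
  unfold group_by_code_alt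
  rw [altLoop_items dets.length dets PySem.Dict.empty (le_refl _) (fun x _ => rfl)]
  rfl
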